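-- pv_equiv track=rewrite | github.com/NightScript370/CP-Challenges | Python/fibonacci.py | closestFibonacciNumber
-- ===== SOURCE A (Python) =====
-- def closestFibonacciNumber(paramNumber):
--     sumOfAddition = 1
--     numberAdded = sumOfAddition
--     while sumOfAddition < paramNumber:
--         numberAdded = sumOfAddition - numberAdded
--         sumOfAddition = sumOfAddition + numberAdded
--
--     if sumOfAddition == paramNumber:
--         return [sumOfAddition]
--     else:
--         return [sumOfAddition - numberAdded, sumOfAddition]
-- ===== SOURCE B (Python) =====
-- def closestFibonacciNumber(paramNumber):
--     fibs = [0, 1, 2]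
--     while fibs[-1] < paramNumber:
--         fibs.append(fibs[-1] + fibs[-2])
--     i = 1
--     while fibs[i] < paramNumber:
--         i += 1
--     if fibs[i] == paramNumber:
--         return [fibs[i]]
--     return [fibs[i - 1], fibs[i]]
-- ===== Notes on version B (the rewrite author's own statement) =====
-- stated objective: alternative
-- what changed: B materialises the list of distinct Fibonacci numbers up to the parameter and then scans it for the first entry (from index 1) >= the parameter, instead of A's single pass that tracks two scalar accumulators and reconstructs the lower neighbour by subtraction.
import Mathlib
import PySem

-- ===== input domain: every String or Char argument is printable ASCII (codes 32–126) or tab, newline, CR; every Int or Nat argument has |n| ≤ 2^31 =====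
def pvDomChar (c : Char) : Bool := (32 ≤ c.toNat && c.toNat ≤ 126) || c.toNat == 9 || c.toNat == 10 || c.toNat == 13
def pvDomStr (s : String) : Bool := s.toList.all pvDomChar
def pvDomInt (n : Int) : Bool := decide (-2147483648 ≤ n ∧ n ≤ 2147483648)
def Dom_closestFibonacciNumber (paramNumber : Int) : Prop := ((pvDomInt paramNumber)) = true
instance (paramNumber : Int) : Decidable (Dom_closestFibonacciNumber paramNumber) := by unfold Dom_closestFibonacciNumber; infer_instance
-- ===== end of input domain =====

-- ===== PORT A =====
-- One honest line: B builds an explicit list of distinct Fibonacci numbers and scans it,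
-- instead of A's two-scalar accumulator loop; alternative decomposition, same cost.

-- A's while loop: numberAdded = sumOfAddition - numberAdded; sumOfAddition += numberAdded.
-- The invariant hypotheses only justify termination (measure 2*p - 2*s + a).
def aloopA (p s a : Int) (h1 : 1 ≤ s) (h2 : 0 ≤ a) (h3 : a ≤ s) : Int × Int :=
  if h : s < p then
    aloopA p (s + (s - a)) (s - a) (by omega) (by omega) (by omega)
  else (s, a)
termination_by (2 * p - 2 * s + a).toNat
decreasing_by omega

def closestFibonacciNumber (paramNumber : Int) : List Int :=
  let sa := aloopA paramNumber 1 1 (by norm_num) (by norm_num) (by norm_num)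
  if sa.1 = paramNumber then [sa.1] else [sa.1 - sa.2, sa.1]

-- ===== PORT B =====
-- B's first while loop: the elements appended after the seed [0, 1, 2]; a, b are the
-- last two list entries.  Hypotheses only justify termination (measure p - b).
def fibsB (p a b : Int) (h1 : 0 < a) (h2 : a < b) : List Int :=
  if h : b < p then (a + b) :: fibsB p b (a + b) (by omega) (by omega)
  else []
termination_by (p - b).toNat
decreasing_by omega

-- B's second while loop: walk the list from index 1 (prev = entry at i-1) to the first
-- entry ≥ p; [] is unreachable because the last list entry is ≥ p.
def scanB (p prev : Int) : List Int → List Int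
  | [] => []
  | c :: rest =>
    if c < p then scanB p c rest
    else if c = p then [c] else [prev, c]

def closestFibonacciNumber_alt (paramNumber : Int) : List Int :=
  scanB paramNumber 0 (1 :: 2 :: fibsB paramNumber 1 2 (by norm_num) (by norm_num))

-- ===== PRECONDITION & SPEC =====
def Spec_closestFibonacciNumber (paramNumber : Int) (out : List Int) : Prop := out = closestFibonacciNumber_alt paramNumber
instance (paramNumber : Int) (out : List Int) : Decidable (Spec_closestFibonacciNumber paramNumber out) := by unfold Spec_closestFibonacciNumber; infer_instance

-- ===== CLAIM (what is proved, stated in full; the proofs are below) =====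
def Claim_equal_closestFibonacciNumber : Prop := ∀ (paramNumber : Int), Dom_closestFibonacciNumber paramNumber → Spec_closestFibonacciNumber paramNumber (closestFibonacciNumber paramNumber)

-- ===== LEMMAS AND PROOFS =====

-- ===== VERDICT (by name: the statement is the Claim_ definition above) =====
-- proof irrelevance shuttles for the value arguments of the proof-carrying loops
lemma scanfibs_congr (p x x' b b' : Int) (h1 : 0 < x) (h2 : x < b)
    (h1' : 0 < x') (h2' : x' < b') (e1 : x = x') (e2 : b = b') :
    scanB p x (b :: fibsB p x b h1 h2) = scanB p x' (b' :: fibsB p x' b' h1' h2') := by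
  subst e1; subst e2; rfl

-- Main loop correspondence: A's state (s, aa) matches B's scan state (prev = s - aa)
-- with the not-yet-built extension fibsB p (s - aa) s.
lemma main_loop (p : Int) (n : ℕ) : ∀ (s aa : Int) (h1 : 0 < aa) (h2 : aa < s),
    (p - s).toNat = n →
    (if (aloopA p s aa (by omega) (by omega) (by omega)).1 = p then
        [(aloopA p s aa (by omega) (by omega) (by omega)).1]
      else
        [(aloopA p s aa (by omega) (by omega) (by omega)).1 -
           (aloopA p s aa (by omega) (by omega) (by omega)).2,
         (aloopA p s aa (by omega) (by omega) (by omega)).1]) =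
      scanB p (s - aa) (s :: fibsB p (s - aa) s (by omega) (by omega)) := by
  induction n using Nat.strong_induction_on with
  | _ n ih =>
    intro s aa h1 h2 hn
    by_cases hlt : s < p
    · rw [aloopA, dif_pos hlt, fibsB, dif_pos hlt]
      rw [show scanB p (s - aa) (s :: (s - aa + s) :: fibsB p s (s - aa + s) (by omega) (by omega))
            = scanB p s ((s - aa + s) :: fibsB p s (s - aa + s) (by omega) (by omega)) from by
        rw [scanB, if_pos hlt]]
      exact (ih ((p - (s + (s - aa))).toNat) (by omega) (s + (s - aa)) (s - aa)
          (by omega) (by omega) rfl).trans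
        (scanfibs_congr p _ _ _ _ (by omega) (by omega) (by omega) (by omega)
          (by ring) (by ring))
    · rw [aloopA, dif_neg hlt, fibsB, dif_neg hlt]
      simp only [scanB, if_neg hlt]

theorem closestFibonacciNumber_spec : Claim_equal_closestFibonacciNumber := by
  intro p _
  unfold Spec_closestFibonacciNumber closestFibonacciNumber closestFibonacciNumber_alt
  by_cases h2 : 2 ≤ p
  · -- two A-steps from (1,1) reach (2,1); one scan step on B passes the entry 1
    rw [show (aloopA p 1 1 (by norm_num) (by norm_num) (by norm_num))
          = aloopA p 2 1 (by norm_num) (by norm_num) (by norm_num) from by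
      rw [aloopA, dif_pos (by omega : (1:Int) < p)]
      rw [aloopA, dif_pos (by omega : (1:Int) + (1 - 1) < p)]
      rfl]
    rw [show scanB p 0 (1 :: 2 :: fibsB p 1 2 (by norm_num) (by norm_num))
          = scanB p 1 (2 :: fibsB p 1 2 (by norm_num) (by norm_num)) from by
      rw [scanB, if_pos (by omega : (1:Int) < p)]]
    exact main_loop p ((p - 2).toNat) 2 1 (by norm_num) (by norm_num) rfl
  · -- p ≤ 1: both loops stop immediately
    rw [aloopA, dif_neg (by omega : ¬ (1:Int) < p), fibsB, dif_neg (by omega : ¬ (2:Int) < p)]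
    simp only [scanB, if_neg (by omega : ¬ (1:Int) < p)]
    norm_num
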